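-- pv_equiv track=rewrite | github.com/sunilgitb/DSAlgo-Python | 17_Bit-Manipulation/20. Maximize XOR.py | maximize_xor_count
-- ===== SOURCE A (Python) =====
-- def maximize_xor_count(n):
--     res = 0
--     i = 1
--     while n:
--         if n & 1 == 0:
--             res += (2**i) // 2
--         i += 1
--         n = n >> 1
--     return res
-- ===== SOURCE B (Python) =====
-- def maximize_xor_count(n):
--     return ((1 << n.bit_length()) - 1) ^ n
-- ===== Notes on version B (the rewrite author's own statement) =====
-- stated objective: simpler
-- what changed: Replaces the bit-by-bit while loop that accumulates a power of two for each zero bit with the single closed-form mask expression ((1 << n.bit_length()) - 1) ^ n.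
import Mathlib
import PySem

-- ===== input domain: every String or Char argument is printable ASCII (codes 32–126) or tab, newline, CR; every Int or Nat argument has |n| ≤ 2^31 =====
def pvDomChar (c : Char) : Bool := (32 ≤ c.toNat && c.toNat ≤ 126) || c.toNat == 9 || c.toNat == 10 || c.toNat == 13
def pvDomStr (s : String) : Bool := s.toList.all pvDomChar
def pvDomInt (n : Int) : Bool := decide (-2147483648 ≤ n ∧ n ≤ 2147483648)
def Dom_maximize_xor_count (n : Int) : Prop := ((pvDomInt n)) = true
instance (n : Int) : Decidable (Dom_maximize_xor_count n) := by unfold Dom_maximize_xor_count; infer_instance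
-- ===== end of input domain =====

-- B replaces A's bit-by-bit accumulation loop with the closed-form mask expression ((1 << n.bit_length()) - 1) ^ n (objective: simpler — one expression, no loop).
-- Pre_ excludes n < 0, on which A's `while n` loop never terminates (n >> 1 stalls at -1), so A returns no value there.


-- ===== PORT A =====
-- `while n: … ; n = n >> 1` as structural recursion on the loop state; the
-- `n < 0` branch is a totality guard only (Python's loop never ends there;
-- such n are outside Pre_).  `2**i` with i ≥ 1 throughout the run is ported
-- as `2 ^ i.toNat`; `(…)//2` is PySem.Int.floordiv, `n & 1` is PySem.Int.band.
def maximize_xor_count_loop (n res i : Int) : Int :=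
  if n = 0 then res
  else if n < 0 then res
  else
    maximize_xor_count_loop (n >>> (1 : Nat))
      (if PySem.Int.band n 1 = 0 then res + PySem.Int.floordiv (2 ^ i.toNat) 2 else res)
      (i + 1)
termination_by n.toNat
decreasing_by
  have h : n >>> (1 : Nat) = n / 2 := by
    simpa using Int.shiftRight_eq_div_pow n 1
  rw [h]; omega

def maximize_xor_count (n : Int) : Int :=
  maximize_xor_count_loop n 0 1

-- ===== PORT B =====
def maximize_xor_count_alt (n : Int) : Int :=
  PySem.Int.bxor (((1 : Int) <<< PySem.Int.bitLength n) - 1) n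

-- ===== PRECONDITION & SPEC =====
-- Pre_ excludes n < 0: there Python A's `while n` never terminates, so A returns no value.
def Pre_maximize_xor_count (n : Int) : Prop := 0 ≤ n
instance (n : Int) : Decidable (Pre_maximize_xor_count n) := by unfold Pre_maximize_xor_count; infer_instance
def pvWitness_maximize_xor_count : Int := 5

def Spec_maximize_xor_count (n : Int) (out : Int) : Prop := out = maximize_xor_count_alt n
instance (n : Int) (out : Int) : Decidable (Spec_maximize_xor_count n out) := by unfold Spec_maximize_xor_count; infer_instance

-- ===== CLAIM (what is proved, stated in full; the proofs are below) =====
def Claim_equal_maximize_xor_count : Prop := ∀ (n : Int), Dom_maximize_xor_count n → Pre_maximize_xor_count n → Spec_maximize_xor_count n (maximize_xor_count n)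

-- ===== LEMMAS AND PROOFS =====

-- XOR of a (2x+1)-shaped number with 2q+r, r < 2, peels one low bit.
lemma pv_xor_step (x q r : Nat) (hr : r < 2) :
    (2 * x + 1) ^^^ (2 * q + r) = 2 * (x ^^^ q) + (1 - r) := by
  interval_cases r
  · simpa [Nat.bit_val] using Nat.xor_bit true x false q
  · simpa [Nat.bit_val] using Nat.xor_bit true x true q

-- One halving step of B's mask-xor value.
lemma pv_mask_step (m : Nat) (hm : 0 < m) :
    (2 ^ PySem.Int.bitLength (↑m) - 1) ^^^ m
      = 2 * ((2 ^ PySem.Int.bitLength (↑(m / 2)) - 1) ^^^ (m / 2)) + (1 - m % 2) := by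
  rw [PySem.Int.bitLength_natCast hm]
  set a : Nat := 2 ^ PySem.Int.bitLength (↑(m / 2) : Int) - 1 with ha
  have h1 : 2 ^ (PySem.Int.bitLength (↑(m / 2) : Int) + 1) - 1 = 2 * a + 1 := by
    have : 1 ≤ 2 ^ PySem.Int.bitLength (↑(m / 2) : Int) := Nat.one_le_two_pow
    rw [ha, pow_succ]; omega
  have h2 : m = 2 * (m / 2) + m % 2 := by omega
  rw [h1]
  conv_lhs => rw [h2]
  exact pv_xor_step a (m / 2) (m % 2) (Nat.mod_lt m (by norm_num))

-- Loop invariant: A's loop computes res + 2^k times B's mask-xor value.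
lemma pv_loop_eq (m : Nat) : ∀ (res : Int) (k : Nat),
    maximize_xor_count_loop (↑m) res (↑k + 1)
      = res + 2 ^ k * ((2 ^ PySem.Int.bitLength (↑m) - 1) ^^^ m : Nat) := by
  induction m using Nat.strong_induction_on with
  | _ m ih =>
    intro res k
    rcases Nat.eq_zero_or_pos m with hm | hm
    · subst hm
      rw [maximize_xor_count_loop]
      simp [PySem.Int.bitLength_zero]
    · rw [maximize_xor_count_loop]
      have hne : (↑m : Int) ≠ 0 := by exact_mod_cast hm.ne'
      have hnlt : ¬ ((↑m : Int) < 0) := by omega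
      rw [if_neg hne, if_neg hnlt]
      have hshift : (↑m : Int) >>> (1 : Nat) = ↑(m / 2) := by
        have h := Int.shiftRight_eq_div_pow (↑m) 1
        simp only [pow_one] at h
        rw [h]; omega
      have hband : PySem.Int.band (↑m) 1 = ↑(m % 2) := by
        have h := PySem.Int.band_natCast m 1
        simpa [Nat.and_one_is_mod] using h
      have hi : ((↑k : Int) + 1).toNat = k + 1 := by omega
      have hfd : PySem.Int.floordiv (2 ^ (k + 1)) 2 = 2 ^ k := by
        rw [PySem.Int.floordiv_eq_ediv_of_pos (by norm_num), pow_succ]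
        exact Int.mul_ediv_cancel _ (by norm_num)
      rw [hshift, hband, hi, hfd]
      have hstep : ((↑k : Int) + 1) + 1 = (↑(k + 1) : Int) + 1 := by push_cast; ring
      rw [hstep, ih (m / 2) (Nat.div_lt_self hm one_lt_two)]
      rw [pv_mask_step m hm]
      rcases Nat.mod_two_eq_zero_or_one m with h2 | h2 <;>
        simp [h2] <;> ring

-- ===== VERDICT (by name: the statement is the Claim_ definition above) =====
theorem maximize_xor_count_spec : Claim_equal_maximize_xor_count := by
  intro n _ hpre
  unfold Spec_maximize_xor_count
  obtain ⟨m, rfl⟩ : ∃ m : Nat, n = ↑m := ⟨n.toNat, (Int.toNat_of_nonneg hpre).symm⟩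
  unfold maximize_xor_count maximize_xor_count_alt
  have h := pv_loop_eq m 0 0
  simp only [Nat.cast_zero, zero_add, pow_zero, one_mul] at h
  rw [h]
  have hshl : (1 : Int) <<< PySem.Int.bitLength (↑m)
      = ↑(2 ^ PySem.Int.bitLength (↑m) : Nat) := by
    simp [Int.shiftLeft_eq]
  rw [hshl]
  have hsub : (↑(2 ^ PySem.Int.bitLength (↑m) : Nat) : Int) - 1
      = ↑(2 ^ PySem.Int.bitLength (↑m) - 1 : Nat) := by
    have : 1 ≤ 2 ^ PySem.Int.bitLength (↑m : Int) := Nat.one_le_two_pow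
    omega
  rw [hsub, PySem.Int.bxor_natCast]
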